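-- pv_equiv track=rewrite | github.com/JakeChrist/DataMiner | app/ui/answer_view.py | _format_token_usage
-- ===== SOURCE A (Python) =====
-- def _format_token_usage(token_usage: dict[str, int] | None) -> str:
--     if not token_usage:
--         return "Tokens: —"
--     ordered_keys = ["prompt_tokens", "completion_tokens", "total_tokens"]
--     parts: list[str] = []
--     for key in ordered_keys:
--         if key in token_usage:
--             parts.append(f"{key.replace('_', ' ').title()}: {token_usage[key]}")
--     for key, value in token_usage.items():
--         if key not in ordered_keys:
--             parts.append(f"{key.replace('_', ' ').title()}: {value}")
--     return ", ".join(parts) if parts else "Tokens: —"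
-- ===== SOURCE B (Python) =====
-- def _format_token_usage(token_usage: dict[str, int] | None) -> str:
--     if not token_usage:
--         return "Tokens: —"
--     order = {"prompt_tokens": 0, "completion_tokens": 1, "total_tokens": 2}
--     keys = sorted(token_usage, key=lambda k: order.get(k, 3))
--     return ", ".join(f"{k.replace('_', ' ').title()}: {token_usage[k]}" for k in keys)
-- ===== Notes on version B (the rewrite author's own statement) =====
-- stated objective: simpler
-- what changed: Replaces A's two scans (a probe loop over the three ordered keys plus a second loop over the dict items) by one stable sort of the dict keys under a priority map followed by a single formatting pass; Pre_ excludes association lists with duplicate keys, which correspond to no Python dict.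
import Mathlib
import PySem

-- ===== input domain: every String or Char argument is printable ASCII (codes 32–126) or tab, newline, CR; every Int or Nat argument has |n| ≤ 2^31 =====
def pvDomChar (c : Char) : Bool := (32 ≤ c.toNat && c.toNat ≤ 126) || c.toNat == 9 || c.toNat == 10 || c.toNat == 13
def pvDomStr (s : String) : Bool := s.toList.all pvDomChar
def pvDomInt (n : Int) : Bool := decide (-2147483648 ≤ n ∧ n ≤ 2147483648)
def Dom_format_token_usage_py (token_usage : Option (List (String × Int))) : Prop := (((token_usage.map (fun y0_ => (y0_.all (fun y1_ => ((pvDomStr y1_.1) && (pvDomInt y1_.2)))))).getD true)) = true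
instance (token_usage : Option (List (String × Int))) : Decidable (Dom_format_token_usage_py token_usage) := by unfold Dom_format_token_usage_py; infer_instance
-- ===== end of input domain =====

-- B replaces A's two scans (ordered-key probe loop + items loop) by one stable sort of the
-- dict keys under a priority map followed by a single formatting pass (objective: simpler).

-- ===== PORT A =====

-- str.title() on the ASCII domain: an alpha char after a non-alpha char is uppercased,
-- other alpha chars lowercased, non-alpha chars kept; exact for printable-ASCII input.
def pyTitleGo (prevAlpha : Bool) : List Char → List Char
  | [] => []
  | c :: rest =>
    if c.isAlpha then (if prevAlpha then c.toLower else c.toUpper) :: pyTitleGo true rest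
    else c :: pyTitleGo false rest

-- f"{key.replace('_', ' ').title()}: {value}" (shared by both ports: the identical f-string in A and B)
def pvFmt (k : String) (v : Int) : String :=
  String.ofList (pyTitleGo false (PySem.Str.replace k "_" " ").toList) ++ ": " ++ PySem.Int.toStr v

def pvOrderedKeys : List String := ["prompt_tokens", "completion_tokens", "total_tokens"]

def format_token_usage_py (token_usage : Option (List (String × Int))) : String :=
  match token_usage with
  | none => "Tokens: —"
  | some l =>
    if l = [] then "Tokens: —"
    else
      -- for key in ordered_keys: if key in token_usage: parts.append(...)
      let parts1 := pvOrderedKeys.foldl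
        (fun acc k => if l.any (fun kv => kv.1 == k) then acc ++ [pvFmt k (PySem.Dict.getD ⟨l⟩ k 0)] else acc) []
      -- for key, value in token_usage.items(): if key not in ordered_keys: parts.append(...)
      let parts := l.foldl
        (fun acc kv => if !(pvOrderedKeys.contains kv.1) then acc ++ [pvFmt kv.1 kv.2] else acc) parts1
      if parts = [] then "Tokens: —" else PySem.Str.join ", " parts

-- ===== PORT B =====

-- order.get(k, 3) for order = {"prompt_tokens": 0, "completion_tokens": 1, "total_tokens": 2}
def pvPrio (k : String) : Int :=
  PySem.Dict.getD ⟨[("prompt_tokens", 0), ("completion_tokens", 1), ("total_tokens", 2)]⟩ k 3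

def format_token_usage_py_alt (token_usage : Option (List (String × Int))) : String :=
  match token_usage with
  | none => "Tokens: —"
  | some l =>
    if l = [] then "Tokens: —"
    else
      let keys := PySem.List.sorted (l.map Prod.fst) pvPrio false
      PySem.Str.join ", " (keys.map (fun k => pvFmt k (PySem.Dict.getD ⟨l⟩ k 0)))

-- ===== PRECONDITION & SPEC =====
-- Pre_ excludes association lists with duplicate keys: they correspond to no Python dict
-- (dict keys are unique), so neither program is ever run on them.
def Pre_format_token_usage_py (token_usage : Option (List (String × Int))) : Prop :=
  ((token_usage.getD []).map Prod.fst).Nodup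
instance (token_usage : Option (List (String × Int))) : Decidable (Pre_format_token_usage_py token_usage) := by
  unfold Pre_format_token_usage_py; infer_instance

def pvWitness_format_token_usage_py : (Option (List (String × Int))) :=
  some [("total_tokens", 12), ("prompt_tokens", 7), ("cached", 3)]

def Spec_format_token_usage_py (token_usage : Option (List (String × Int))) (out : String) : Prop := out = format_token_usage_py_alt token_usage
instance (token_usage : Option (List (String × Int))) (out : String) : Decidable (Spec_format_token_usage_py token_usage out) := by unfold Spec_format_token_usage_py; infer_instance

-- ===== CLAIM (what is proved, stated in full; the proofs are below) =====
def Claim_equal_format_token_usage_py : Prop := ∀ (token_usage : Option (List (String × Int))), Dom_format_token_usage_py token_usage → Pre_format_token_usage_py token_usage → Spec_format_token_usage_py token_usage (format_token_usage_py token_usage)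

-- ===== LEMMAS AND PROOFS =====

-- a stable insert lands between a prefix it does not go before and a suffix it goes before
theorem pvInsertBy_mid {α : Type} (before : α → α → Bool) (x : α) (as bs : List α)
    (ha : ∀ y ∈ as, before x y = false) (hb : ∀ y ∈ bs, before x y = true) :
    PySem.List.insertBy before x (as ++ bs) = as ++ x :: bs := by
  induction as with
  | nil =>
    cases bs with
    | nil => simp [PySem.List.insertBy]
    | cons b bs' => simp [PySem.List.insertBy, hb b (by simp)]
  | cons a as' ih =>
    have : before x a = false := ha a (by simp)
    simp [PySem.List.insertBy, this]
    exact ih (fun y hy => ha y (by simp [hy]))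

def pvSeg (i : Int) (ks : List String) : List String := ks.filter (fun k => pvPrio k == i)

theorem pvPrio_eq (k : String) :
    pvPrio k = if k = "prompt_tokens" then 0 else if k = "completion_tokens" then 1
      else if k = "total_tokens" then 2 else 3 := by
  by_cases h1 : k = "prompt_tokens" <;> by_cases h2 : k = "completion_tokens" <;>
    by_cases h3 : k = "total_tokens" <;>
    simp_all [pvPrio, PySem.Dict.getD, PySem.Dict.get?, List.find?]
  have e1 : ("prompt_tokens" == k) = false := by simp; exact fun h => h1 h.symm
  have e2 : ("completion_tokens" == k) = false := by simp; exact fun h => h2 h.symm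
  have e3 : ("total_tokens" == k) = false := by simp; exact fun h => h3 h.symm
  simp [e1, e2, e3]

theorem pvPrio_cases (k : String) : pvPrio k = 0 ∨ pvPrio k = 1 ∨ pvPrio k = 2 ∨ pvPrio k = 3 := by
  rw [pvPrio_eq]; split_ifs <;> simp

theorem pvMem_seg {i : Int} {ks : List String} {y : String} (h : y ∈ pvSeg i ks) : pvPrio y = i := by
  simp [pvSeg, List.mem_filter] at h; exact h.2

-- the stable sort by priority is exactly the four priority segments in original order
theorem pvSorted_seg (ks : List String) :
    PySem.List.sorted ks pvPrio false = pvSeg 0 ks ++ pvSeg 1 ks ++ pvSeg 2 ks ++ pvSeg 3 ks := by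
  induction ks using List.reverseRecOn with
  | nil => simp [PySem.List.sorted_eq_foldl_insertBy, pvSeg]
  | append_singleton ks x ih =>
    rw [PySem.List.sorted_eq_foldl_insertBy] at *
    rw [List.foldl_append, List.foldl_cons, List.foldl_nil, ih]
    have hseg : ∀ i : Int, pvSeg i (ks ++ [x]) = pvSeg i ks ++ if pvPrio x == i then [x] else [] := by
      intro i; simp [pvSeg, List.filter_append]; split <;> simp_all
    have hlt : ∀ (i : Int) (y : String), y ∈ pvSeg i ks →
        (decide (pvPrio x < pvPrio y) : Bool) = decide (pvPrio x < i) := by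
      intro i y hy; rw [pvMem_seg hy]
    rcases pvPrio_cases x with h | h | h | h
    · rw [show pvSeg 0 ks ++ pvSeg 1 ks ++ pvSeg 2 ks ++ pvSeg 3 ks
          = pvSeg 0 ks ++ (pvSeg 1 ks ++ pvSeg 2 ks ++ pvSeg 3 ks) by simp,
        pvInsertBy_mid _ x _ _ (fun y hy => by rw [hlt 0 y hy, h]; simp)
          (fun y hy => by
            rcases List.mem_append.1 hy with hy | hy
            · rcases List.mem_append.1 hy with hy | hy
              · rw [hlt 1 y hy, h]; simp
              · rw [hlt 2 y hy, h]; simp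
            · rw [hlt 3 y hy, h]; simp)]
      simp [hseg, h]
    · rw [show pvSeg 0 ks ++ pvSeg 1 ks ++ pvSeg 2 ks ++ pvSeg 3 ks
          = (pvSeg 0 ks ++ pvSeg 1 ks) ++ (pvSeg 2 ks ++ pvSeg 3 ks) by simp,
        pvInsertBy_mid _ x _ _
          (fun y hy => by
            rcases List.mem_append.1 hy with hy | hy
            · rw [hlt 0 y hy, h]; simp
            · rw [hlt 1 y hy, h]; simp)
          (fun y hy => by
            rcases List.mem_append.1 hy with hy | hy
            · rw [hlt 2 y hy, h]; simp
            · rw [hlt 3 y hy, h]; simp)]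
      simp [hseg, h]
    · rw [show pvSeg 0 ks ++ pvSeg 1 ks ++ pvSeg 2 ks ++ pvSeg 3 ks
          = (pvSeg 0 ks ++ pvSeg 1 ks ++ pvSeg 2 ks) ++ pvSeg 3 ks by simp,
        pvInsertBy_mid _ x _ _
          (fun y hy => by
            rcases List.mem_append.1 hy with hy | hy
            · rcases List.mem_append.1 hy with hy | hy
              · rw [hlt 0 y hy, h]; simp
              · rw [hlt 1 y hy, h]; simp
            · rw [hlt 2 y hy, h]; simp)
          (fun y hy => by rw [hlt 3 y hy, h]; simp)]
      simp [hseg, h]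
    · rw [show pvSeg 0 ks ++ pvSeg 1 ks ++ pvSeg 2 ks ++ pvSeg 3 ks
          = (pvSeg 0 ks ++ pvSeg 1 ks ++ pvSeg 2 ks ++ pvSeg 3 ks) ++ [] by simp]
      rw [pvInsertBy_mid _ x _ []
          (fun y hy => by
            rcases List.mem_append.1 hy with hy | hy
            · rcases List.mem_append.1 hy with hy | hy
              · rcases List.mem_append.1 hy with hy | hy
                · rw [hlt 0 y hy, h]; simp
                · rw [hlt 1 y hy, h]; simp
              · rw [hlt 2 y hy, h]; simp
            · rw [hlt 3 y hy, h]; simp)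
          (fun y hy => by simp at hy)]
      simp [hseg, h]

-- filtering a nodup list for one value
theorem pvFilter_eq_single {l : List String} {a : String} (h : l.Nodup) :
    l.filter (· == a) = if a ∈ l then [a] else [] := by
  induction l with
  | nil => simp
  | cons x xs ih =>
    simp only [List.nodup_cons] at h
    by_cases hx : x = a
    · have hnil : List.filter (· == a) xs = [] := by
        apply List.filter_eq_nil_iff.mpr
        intro b hb
        simp only [beq_iff_eq]
        rintro rfl
        exact h.1 (hx ▸ hb)
      simp [hx, hnil]
    · simp [hx, ih h.2, Ne.symm hx]

-- first-match lookup on a nodup-key assoc list returns the paired value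
theorem pvGetD_of_mem {l : List (String × Int)} {k : String} {v : Int}
    (h : (l.map Prod.fst).Nodup) (hm : (k, v) ∈ l) : PySem.Dict.getD ⟨l⟩ k 0 = v := by
  induction l with
  | nil => simp at hm
  | cons kv rest ih =>
    simp only [List.map_cons, List.nodup_cons] at h
    rcases List.mem_cons.1 hm with hm | hm
    · subst hm
      simp [PySem.Dict.getD, PySem.Dict.get?, List.find?]
    · have hk : kv.1 ≠ k := by
        rintro rfl; exact h.1 (List.mem_map.2 ⟨(kv.1, v), hm, rfl⟩)
      have hb : (kv.1 == k) = false := by simp [hk]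
      have := ih h.2 hm
      simpa [PySem.Dict.getD, PySem.Dict.get?, PySem.Dict.items, List.find?, hb]
        using this

theorem format_token_usage_py_spec : Claim_equal_format_token_usage_py := by
  intro tu _hdom hpre
  unfold Spec_format_token_usage_py
  match tu with
  | none => rfl
  | some l =>
    by_cases hl : l = []
    · simp [format_token_usage_py, format_token_usage_py_alt, hl]
    · have hnd : (l.map Prod.fst).Nodup := hpre
      simp only [format_token_usage_py, format_token_usage_py_alt, if_neg hl]
      set f : String → String := fun k => pvFmt k (PySem.Dict.getD ⟨l⟩ k 0) with hf
      -- A's two loops as filters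
      have hA1 : pvOrderedKeys.foldl
          (fun acc k => if l.any (fun kv => kv.1 == k) then acc ++ [pvFmt k (PySem.Dict.getD ⟨l⟩ k 0)] else acc) []
          = (pvOrderedKeys.filter (fun k => l.any (fun kv => kv.1 == k))).map f := by
        rw [PySem.List.foldl_append_if, List.nil_append]
      have hA2 : ∀ init : List String, l.foldl
          (fun acc kv => if !(pvOrderedKeys.contains kv.1) then acc ++ [pvFmt kv.1 kv.2] else acc) init
          = init ++ (l.filter (fun kv => !(pvOrderedKeys.contains kv.1))).map (fun kv => pvFmt kv.1 kv.2) := by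
        intro init; rw [PySem.List.foldl_append_if]
      rw [hA2, hA1]
      -- memberships
      have hq : ∀ a : String, ((l.any fun kv => kv.1 == a) = true) ↔ a ∈ l.map Prod.fst := by
        intro a
        constructor
        · intro h
          obtain ⟨kv, hkv, he⟩ := List.any_eq_true.1 h
          exact List.mem_map.2 ⟨kv, hkv, by simpa using he⟩
        · intro h
          obtain ⟨kv, hkv, he⟩ := List.mem_map.1 h
          exact List.any_eq_true.2 ⟨kv, hkv, by simp [he]⟩
      -- the i-th segment for i = 0,1,2 is the nodup filter for its single key
      have hseg_ord : ∀ (i : Int) (a : String), pvPrio a = i →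
          (∀ k, pvPrio k = i → k = a) →
          pvSeg i (l.map Prod.fst) = if a ∈ l.map Prod.fst then [a] else [] := by
        intro i a ha huniq
        have : pvSeg i (l.map Prod.fst) = (l.map Prod.fst).filter (· == a) := by
          apply List.filter_congr
          intro k _
          rcases eq_or_ne k a with rfl | hne
          · simp [ha]
          · have h1 : (k == a) = false := by simp [hne]
            have h2 : (pvPrio k == i) = false := by
              simp only [beq_eq_false_iff_ne, ne_eq]
              intro hp; exact hne (huniq k hp)
            rw [h1, h2]
        rw [this, pvFilter_eq_single hnd]
      have hp0 := hseg_ord 0 "prompt_tokens" (by rw [pvPrio_eq]; simp)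
        (fun k hk => by rw [pvPrio_eq] at hk; split_ifs at hk <;> simp_all)
      have hp1 := hseg_ord 1 "completion_tokens" (by rw [pvPrio_eq]; simp)
        (fun k hk => by rw [pvPrio_eq] at hk; split_ifs at hk <;> simp_all)
      have hp2 := hseg_ord 2 "total_tokens" (by rw [pvPrio_eq]; simp)
        (fun k hk => by rw [pvPrio_eq] at hk; split_ifs at hk <;> simp_all)
      -- segment 3: the unknown keys in insertion order
      have hp3 : (pvSeg 3 (l.map Prod.fst)).map f
          = (l.filter (fun kv => !(pvOrderedKeys.contains kv.1))).map (fun kv => pvFmt kv.1 kv.2) := by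
        have hpred : pvSeg 3 (l.map Prod.fst)
            = (l.map Prod.fst).filter (fun k => !(pvOrderedKeys.contains k)) := by
          apply List.filter_congr
          intro k _
          rw [pvPrio_eq]
          by_cases h1 : k = "prompt_tokens"
          · simp [h1, pvOrderedKeys]
          · by_cases h2 : k = "completion_tokens"
            · simp [h2, pvOrderedKeys]
            · by_cases h3 : k = "total_tokens"
              · simp [h3, pvOrderedKeys]
              · simp [h1, h2, h3, pvOrderedKeys]
        rw [hpred, List.filter_map, List.map_map]
        have hfe : List.filter ((fun k => !pvOrderedKeys.contains k) ∘ Prod.fst) l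
            = List.filter (fun kv => !(pvOrderedKeys.contains kv.1)) l := by
          apply List.filter_congr; intro kv _; rfl
        rw [hfe]
        apply List.map_congr_left
        intro kv hkv
        obtain ⟨a, b⟩ := kv
        have hkv' : (a, b) ∈ l := List.mem_of_mem_filter hkv
        show pvFmt a (PySem.Dict.getD ⟨l⟩ a 0) = pvFmt a b
        rw [pvGetD_of_mem hnd hkv']
      -- A's parts = f mapped over the sorted keys
      have hmain : (pvOrderedKeys.filter (fun k => l.any (fun kv => kv.1 == k))).map f
            ++ (l.filter (fun kv => !(pvOrderedKeys.contains kv.1))).map (fun kv => pvFmt kv.1 kv.2)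
          = (PySem.List.sorted (l.map Prod.fst) pvPrio false).map f := by
        rw [pvSorted_seg]
        simp only [List.map_append, hp0, hp1, hp2, hp3]
        congr 1
        simp only [pvOrderedKeys, List.filter_cons, List.filter_nil]
        by_cases m1 : "prompt_tokens" ∈ l.map Prod.fst <;>
          by_cases m2 : "completion_tokens" ∈ l.map Prod.fst <;>
          by_cases m3 : "total_tokens" ∈ l.map Prod.fst <;>
          simp [m1, m2, m3, (hq "prompt_tokens"), (hq "completion_tokens"), (hq "total_tokens")]
      rw [hmain]
      have hne : (PySem.List.sorted (l.map Prod.fst) pvPrio false).map f ≠ [] := by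
        simp [PySem.List.sorted_eq_nil_iff, hl]
      rw [if_neg hne]
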